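-- pv_equiv track=rewrite | github.com/lukas-ke/lsp | lua/sillyparse.py | _find_indexing_start
-- ===== SOURCE A (Python) =====
-- NAME_SYMBOLS = "123456789ABCDEFGHIJKLMNOPQRSTUVWXYZabcdefghijklmnopqrstuvwxyz_"
--
-- INDEXING_SYMBOLS = ".:"
--
-- def _find_indexing_start(line: str, char_num: int):
--     """Return the position of the first indexing-symbol preceding char_num
--
--     """
--     start = None
--     for i in range(char_num, -1, -1):
--         if line[i] in NAME_SYMBOLS or line[i] in INDEXING_SYMBOLS:
--             start = i
--         else:
--             break
--     return start
-- ===== SOURCE B (Python) =====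
-- NAME_SYMBOLS = "123456789ABCDEFGHIJKLMNOPQRSTUVWXYZabcdefghijklmnopqrstuvwxyz_"
--
-- INDEXING_SYMBOLS = ".:"
--
-- _ALLOWED = frozenset(NAME_SYMBOLS + INDEXING_SYMBOLS)
--
-- def _find_indexing_start(line: str, char_num: int):
--     """Single forward pass: the run start is one past the last disallowed
--     character in line[:char_num+1]; None if the run is empty."""
--     start = 0
--     prefix = line[:char_num + 1] if char_num >= 0 else ""
--     for i, ch in enumerate(prefix):
--         if ch not in _ALLOWED:
--             start = i + 1
--     return start if char_num >= 0 and start <= char_num else None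
-- ===== Notes on version B (the rewrite author's own statement) =====
-- stated objective: alternative
-- what changed: Replaces A's backward index loop with breaks by a single forward pass over the prefix line[:char_num+1] that tracks one past the last disallowed character, then a closed-form final check.
import Mathlib
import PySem

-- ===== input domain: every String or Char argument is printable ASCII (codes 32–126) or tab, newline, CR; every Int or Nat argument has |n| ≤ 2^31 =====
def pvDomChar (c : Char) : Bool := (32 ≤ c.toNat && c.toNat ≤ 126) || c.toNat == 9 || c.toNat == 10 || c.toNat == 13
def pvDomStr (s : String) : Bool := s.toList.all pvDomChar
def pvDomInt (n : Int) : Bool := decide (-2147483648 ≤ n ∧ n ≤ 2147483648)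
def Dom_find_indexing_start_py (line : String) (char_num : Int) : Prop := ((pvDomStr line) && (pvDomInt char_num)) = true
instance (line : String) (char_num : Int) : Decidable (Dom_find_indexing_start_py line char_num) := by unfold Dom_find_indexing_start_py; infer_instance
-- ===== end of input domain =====

-- B replaces A's backward scan-with-break by a single forward pass over the prefix
-- (tracking one past the last disallowed char); equivalence proved where A does not raise.

-- ===== PORT A =====
def pvNameSymbols : List Char := "123456789ABCDEFGHIJKLMNOPQRSTUVWXYZabcdefghijklmnopqrstuvwxyz_".toList
def pvIndexingSymbols : List Char := ".:".toList

-- the 'for i in range(char_num, -1, -1)' loop with its break; pyGet? none = IndexError (outside Pre_)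
def pvALoop (l : List Char) : List Int → Option Int → Option Int
  | [], start => start
  | i :: rest, start =>
    match PySem.List.pyGet? l i with
    | none => start
    | some c =>
      if pvNameSymbols.contains c || pvIndexingSymbols.contains c then
        pvALoop l rest (some i)
      else
        start

def find_indexing_start_py (line : String) (char_num : Int) : Option Int :=
  pvALoop line.toList (PySem.List.pyRange char_num (-1) (-1)) none

-- ===== PORT B =====
def pvAllowed : PySem.Set Char :=
  PySem.Set.ofList ("123456789ABCDEFGHIJKLMNOPQRSTUVWXYZabcdefghijklmnopqrstuvwxyz_.:".toList)

def find_indexing_start_py_alt (line : String) (char_num : Int) : Option Int :=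
  let pre := if 0 ≤ char_num then PySem.List.slice line.toList none (some (char_num + 1)) else []
  let start := (PySem.List.enumerate pre 0).foldl
      (fun s p => if ¬ pvAllowed.contains p.2 then p.1 + 1 else s) 0
  if 0 ≤ char_num ∧ start ≤ char_num then some start else none

-- ===== PRECONDITION & SPEC =====
-- Pre_ excludes exactly the inputs where A raises IndexError: 0 ≤ char_num with char_num ≥ len(line).
def Pre_find_indexing_start_py (line : String) (char_num : Int) : Prop :=
  0 ≤ char_num → char_num < line.toList.length
instance (line : String) (char_num : Int) : Decidable (Pre_find_indexing_start_py line char_num) := by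
  unfold Pre_find_indexing_start_py; infer_instance

def pvWitness_find_indexing_start_py : String × Int := ("abc.d", 4)

def Spec_find_indexing_start_py (line : String) (char_num : Int) (out : Option Int) : Prop :=
  out = find_indexing_start_py_alt line char_num
instance (line : String) (char_num : Int) (out : Option Int) : Decidable (Spec_find_indexing_start_py line char_num out) := by unfold Spec_find_indexing_start_py; infer_instance

-- ===== CLAIM (what is proved, stated in full; the proofs are below) =====
def Claim_equal_find_indexing_start_py : Prop := ∀ (line : String) (char_num : Int), Dom_find_indexing_start_py line char_num → Pre_find_indexing_start_py line char_num → Spec_find_indexing_start_py line char_num (find_indexing_start_py line char_num)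

-- ===== LEMMAS AND PROOFS =====

-- B's folded "one past the last disallowed char" value of a char list
def pvStart (xs : List Char) : Int :=
  (PySem.List.enumerate xs 0).foldl (fun s p => if ¬ pvAllowed.contains p.2 then p.1 + 1 else s) 0

lemma pvStart_nil : pvStart [] = 0 := rfl

lemma pvStart_concat (xs : List Char) (x : Char) :
    pvStart (xs ++ [x]) = if ¬ pvAllowed.contains x then (xs.length : Int) + 1 else pvStart xs := by
  unfold pvStart
  rw [PySem.List.enumerate_append, List.foldl_append]
  simp [PySem.List.enumerate]

lemma pvStart_bounds (xs : List Char) : 0 ≤ pvStart xs ∧ pvStart xs ≤ xs.length := by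
  induction xs using List.reverseRecOn with
  | nil => simp [pvStart_nil]
  | append_singleton xs x ih =>
    rw [pvStart_concat]
    rcases ih with ⟨h0, h1⟩
    split <;> simp <;> omega

-- A's membership test agrees with B's set membership
set_option maxRecDepth 4096 in
lemma pvAllowed_eq : pvAllowed = pvNameSymbols ++ pvIndexingSymbols := by decide

-- A's membership test agrees with B's set membership
lemma pvAllowed_iff (c : Char) :
    (pvNameSymbols.contains c || pvIndexingSymbols.contains c) = pvAllowed.contains c := by
  rw [pvAllowed_eq]
  simp

-- accumulator form of A's loop
lemma pvALoop_acc (l : List Char) (m : Int) (hm : -1 ≤ m) (hlt : m < l.length) :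
    pvALoop l (PySem.List.pyRange m (-1) (-1)) (some (m + 1)) =
      some (pvStart (l.take (m + 1).toNat)) := by
  obtain ⟨k, hk⟩ : ∃ k : Nat, m = (k : Int) - 1 := ⟨(m + 1).toNat, by omega⟩
  subst hk
  induction k generalizing l with
  | zero =>
    rw [PySem.List.pyRange_neg_one_eq_nil (by omega)]
    norm_num [pvALoop, pvStart_nil]
  | succ k ih =>
    have hcast : ((k + 1 : Nat) : Int) - 1 = (k : Int) := by push_cast; ring
    rw [hcast] at hlt ⊢
    rw [PySem.List.pyRange_neg_one_cons (by omega)]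
    have hklen : k < l.length := by exact_mod_cast hlt
    have hget : PySem.List.pyGet? l (k : Int) = some l[k] :=
      PySem.List.pyGet?_ofNat l k hklen
    have htake : l.take ((k : Int) + 1).toNat = l.take k ++ [l[k]] := by
      have h1 : ((k : Int) + 1).toNat = k + 1 := by omega
      rw [h1, List.take_add_one, List.getElem?_eq_getElem hklen]
      rfl
    simp only [pvALoop, hget]
    by_cases hal : pvAllowed.contains l[k] = true
    · rw [if_pos (by rw [pvAllowed_iff]; exact hal)]
      have hih := ih l (by omega) (by omega)
      rw [show ((k : Int) - 1 + 1) = (k : Int) from by ring] at hih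
      rw [hih, htake, pvStart_concat, if_neg (by simpa using hal)]
      congr 3
    · rw [if_neg (by rw [pvAllowed_iff]; simpa using hal)]
      rw [htake, pvStart_concat, if_pos (by simpa using hal)]
      have h2 : (l.take k).length = k := by rw [List.length_take]; omega
      rw [h2]

-- main characterisation of A's loop result
lemma pvA_char (l : List Char) (n : Int) (h0 : 0 ≤ n) (hlt : n < l.length) :
    pvALoop l (PySem.List.pyRange n (-1) (-1)) none =
      if pvStart (l.take (n + 1).toNat) ≤ n then some (pvStart (l.take (n + 1).toNat)) else none := by
  obtain ⟨k, rfl⟩ : ∃ k : Nat, n = (k : Int) := ⟨n.toNat, by omega⟩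
  have hklen : k < l.length := by exact_mod_cast hlt
  have hget : PySem.List.pyGet? l (k : Int) = some l[k] := PySem.List.pyGet?_ofNat l k hklen
  have htake : l.take ((k : Int) + 1).toNat = l.take k ++ [l[k]] := by
    have h1 : ((k : Int) + 1).toNat = k + 1 := by omega
    rw [h1, List.take_add_one, List.getElem?_eq_getElem hklen]
    rfl
  rw [PySem.List.pyRange_neg_one_cons (by omega)]
  simp only [pvALoop, hget]
  by_cases hal : pvAllowed.contains l[k] = true
  · rw [if_pos (by rw [pvAllowed_iff]; exact hal)]
    have hih := pvALoop_acc l ((k : Int) - 1) (by omega) (by omega)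
    rw [show ((k : Int) - 1 + 1) = (k : Int) from by ring] at hih
    rw [hih]
    have hb := pvStart_bounds (l.take ((k : Int)).toNat)
    have hlen : (l.take ((k : Int)).toNat).length ≤ k := by rw [List.length_take]; omega
    have heq : pvStart (l.take ((k : Int) + 1).toNat) = pvStart (l.take ((k : Int)).toNat) := by
      rw [htake, pvStart_concat, if_neg (by simpa using hal)]
      congr 2
    rw [heq, if_pos (by omega)]
  · rw [if_neg (by rw [pvAllowed_iff]; simpa using hal)]
    have hv : pvStart (l.take ((k : Int) + 1).toNat) = (k : Int) + 1 := by
      rw [htake, pvStart_concat, if_pos (by simpa using hal)]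
      have h2 : (l.take k).length = k := by rw [List.length_take]; omega
      rw [h2]
    rw [hv, if_neg (by omega)]

-- B's value, written via pvStart (definitional)
lemma alt_eq (line : String) (char_num : Int) :
    find_indexing_start_py_alt line char_num =
      (if 0 ≤ char_num ∧ pvStart (if 0 ≤ char_num then PySem.List.slice line.toList none (some (char_num + 1)) else []) ≤ char_num
       then some (pvStart (if 0 ≤ char_num then PySem.List.slice line.toList none (some (char_num + 1)) else []))
       else none) := rfl

theorem find_indexing_start_py_spec : Claim_equal_find_indexing_start_py := by
  intro line c hdom hpre
  unfold Spec_find_indexing_start_py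
  rw [alt_eq]
  unfold find_indexing_start_py
  by_cases hc : 0 ≤ c
  · have hlt : c < line.toList.length := hpre hc
    rw [pvA_char line.toList c hc (by exact_mod_cast hlt)]
    rw [if_pos hc, PySem.List.slice_to line.toList (show (0:Int) ≤ c + 1 by omega)]
    by_cases hs : pvStart (line.toList.take (c + 1).toNat) ≤ c
    · rw [if_pos hs, if_pos ⟨hc, hs⟩]
    · rw [if_neg hs, if_neg (by tauto)]
  · rw [PySem.List.pyRange_neg_one_eq_nil (by omega)]
    rw [if_neg (by tauto)]
    rfl
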